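-- pv_equiv track=rewrite | github.com/Michal0ss/ASD | Exam/24/2/A/egz2a.py | wired
-- ===== SOURCE A (Python) =====
-- def wired(T):
--     N = len(T)
--     if N == 0:
--         return 0
--     dp = [[0] * N for _ in range(N)]
--
--     for i in range(2, N+1, 2):
--         # i - długość rozważanego podproblemu (musi być parzysta)
--         for j in range(N-i+1):
--             # j - początek przedziału
--             k = j + i - 1
--             # k - koniec przedziału
--             raw_sum= 1 + abs(T[j] - T[k]) + dp[j+1][k-1]
--             min_cost = raw_sum
--
--             for m in range(j+1, k-1, 2):
--                 cost_diagonal = dp[j][m] + dp[m+1][k]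
--                 if cost_diagonal < min_cost:
--                     min_cost = cost_diagonal
--             dp[j][k] = min_cost
--     return dp[0][N-1]
-- ===== SOURCE B (Python) =====
-- def wired(T):
--     N = len(T)
--     if N == 0 or N % 2 == 1:
--         # an odd number of elements cannot be fully paired; the cost is 0,
--         # exactly as the table version reports (its top-right cell stays 0)
--         return 0
--     memo = {}
--
--     def solve(j, k):
--         if j > k:
--             return 0
--         if (j, k) in memo:
--             return memo[(j, k)]
--         best = 1 + abs(T[j] - T[k]) + solve(j + 1, k - 1)
--         for m in range(j + 1, k - 1, 2):
--             c = solve(j, m) + solve(m + 1, k)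
--             if c < best:
--                 best = c
--         memo[(j, k)] = best
--         return best
--
--     return solve(0, N - 1)
-- ===== Notes on version B (the rewrite author's own statement) =====
-- stated objective: alternative
-- what changed: Replaces the bottom-up O(N^3) table that fills every even-length interval in length order with a top-down memoized recursion solve(j,k) on the same recurrence, which evaluates only the subintervals reachable from (0,N-1) and returns 0 immediately for odd or empty N (where the table's top-right cell stays 0).
import Mathlib
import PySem

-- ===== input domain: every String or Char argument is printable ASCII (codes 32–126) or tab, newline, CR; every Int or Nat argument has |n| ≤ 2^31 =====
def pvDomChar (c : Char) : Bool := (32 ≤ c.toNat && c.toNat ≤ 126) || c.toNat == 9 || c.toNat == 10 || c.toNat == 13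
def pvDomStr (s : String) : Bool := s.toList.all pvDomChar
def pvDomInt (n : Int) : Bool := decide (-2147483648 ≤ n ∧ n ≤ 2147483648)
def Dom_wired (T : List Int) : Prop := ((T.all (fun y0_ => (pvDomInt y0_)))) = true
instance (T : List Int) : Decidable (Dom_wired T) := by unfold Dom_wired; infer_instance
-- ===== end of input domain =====

-- B replaces A's bottom-up interval-DP table with a top-down memoized recursion over
-- the same recurrence (equivalence of the RETURN value; neither version mutates its input).

-- ===== PORT A =====
def wired (T : List Int) : Int :=
  let N : Int := (T.length : Int)
  if N = 0 then 0
  else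
    -- dp = [[0]*N for _ in range(N)]  (list repetition ported by hand: N copies of N zeros, exact)
    let dp0 : List (List Int) := (PySem.List.pyRange 0 N 1).map (fun _ => List.replicate T.length (0 : Int))
    let dp :=
      (PySem.List.pyRange 2 (N + 1) 2).foldl (fun dp i =>
        (PySem.List.pyRange 0 (N - i + 1) 1).foldl (fun dp j =>
          let k := j + i - 1
          let raw_sum := 1 + |PySem.List.pyGetD T j 0 - PySem.List.pyGetD T k 0|
              + PySem.List.pyGetD (PySem.List.pyGetD dp (j + 1) []) (k - 1) 0
          let min_cost := (PySem.List.pyRange (j + 1) (k - 1) 2).foldl (fun mc m =>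
            let cd := PySem.List.pyGetD (PySem.List.pyGetD dp j []) m 0
                    + PySem.List.pyGetD (PySem.List.pyGetD dp (m + 1) []) k 0
            if cd < mc then cd else mc) raw_sum
          PySem.List.pySetD dp j (PySem.List.pySetD (PySem.List.pyGetD dp j []) k min_cost)
        ) dp
      ) dp0
    PySem.List.pyGetD (PySem.List.pyGetD dp 0 []) (N - 1) 0

-- ===== PORT B =====
-- solve(j, k) with the memo dict threaded through; the fuel argument only makes the
-- recursion structural (Python's recursion terminates because the span k-j shrinks),
-- wired_alt passes enough fuel for every reachable call.
def wiredSolve (T : List Int) :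
    Nat → Int → Int → PySem.Dict (Int × Int) Int → Int × PySem.Dict (Int × Int) Int
  | 0, _, _, memo => (0, memo)
  | fuel + 1, j, k, memo =>
    if j > k then (0, memo)
    else
      match memo.get? (j, k) with
      | some v => (v, memo)
      | none =>
        let r := wiredSolve T fuel (j + 1) (k - 1) memo
        let st := (PySem.List.pyRange (j + 1) (k - 1) 2).foldl (fun st m =>
            let a := wiredSolve T fuel j m st.2
            let b := wiredSolve T fuel (m + 1) k a.2
            let c := a.1 + b.1
            if c < st.1 then (c, b.2) else (st.1, b.2))
          (1 + |PySem.List.pyGetD T j 0 - PySem.List.pyGetD T k 0| + r.1, r.2)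
        (st.1, st.2.insert (j, k) st.1)

def wired_alt (T : List Int) : Int :=
  let N : Int := (T.length : Int)
  if N = 0 ∨ N % 2 = 1 then 0
  else (wiredSolve T (T.length + 1) 0 (N - 1) PySem.Dict.empty).1

-- ===== PRECONDITION & SPEC =====
def Spec_wired (T : List Int) (out : Int) : Prop := out = wired_alt T
instance (T : List Int) (out : Int) : Decidable (Spec_wired T out) := by unfold Spec_wired; infer_instance

-- ===== CLAIM (what is proved, stated in full; the proofs are below) =====
def Claim_equal_wired : Prop := ∀ (T : List Int), Dom_wired T → Spec_wired T (wired T)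

-- ===== LEMMAS AND PROOFS =====

def gW (T : List Int) : Nat → Int → Int → Int
  | 0, _, _ => 0
  | fuel + 1, j, k =>
    if j > k then 0
    else (PySem.List.pyRange (j + 1) (k - 1) 2).foldl
        (fun mc m => let c := gW T fuel j m + gW T fuel (m + 1) k; if c < mc then c else mc)
        (1 + |PySem.List.pyGetD T j 0 - PySem.List.pyGetD T k 0| + gW T fuel (j + 1) (k - 1))

theorem gW_fuel_congr (T : List Int) :
    ∀ (f f' : Nat) (j k : Int), (k - j + 2).toNat ≤ f → (k - j + 2).toNat ≤ f' →
      gW T f j k = gW T f' j k := by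
  intro f
  induction f with
  | zero =>
    intro f' j k hf hf'
    have hjk : j > k := by omega
    cases f' with
    | zero => rfl
    | succ f0 => simp [gW, hjk]
  | succ f0 ih =>
    intro f' j k hf hf'
    by_cases hjk : j > k
    · cases f' with
      | zero => simp [gW, hjk]
      | succ f1 => simp [gW, hjk]
    · have hle : j ≤ k := by omega
      cases f' with
      | zero => omega
      | succ f1 =>
        simp only [gW, if_neg hjk]
        have hbase : gW T f0 (j + 1) (k - 1) = gW T f1 (j + 1) (k - 1) := by
          apply ih <;> omega
        rw [hbase]
        apply PySem.List.foldl_congr_mem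
        intro acc m hm
        rw [PySem.List.mem_pyRange_iff_of_pos (by norm_num)] at hm
        obtain ⟨h1, h2, -⟩ := hm
        have e1 : gW T f0 j m = gW T f1 j m := by apply ih <;> omega
        have e2 : gW T f0 (m + 1) k = gW T f1 (m + 1) k := by apply ih <;> omega
        simp [e1, e2]

def GW (T : List Int) (j k : Int) : Int := gW T (k - j + 2).toNat j k

theorem GW_of_gt (T : List Int) (j k : Int) (h : k < j) : GW T j k = 0 := by
  unfold GW
  cases hc : (k - j + 2).toNat with
  | zero => rfl
  | succ f0 => simp [gW, h]

theorem GW_eq (T : List Int) (j k : Int) (h : j ≤ k) :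
    GW T j k = (PySem.List.pyRange (j + 1) (k - 1) 2).foldl
        (fun mc m => let c := GW T j m + GW T (m + 1) k; if c < mc then c else mc)
        (1 + |PySem.List.pyGetD T j 0 - PySem.List.pyGetD T k 0| + GW T (j + 1) (k - 1)) := by
  obtain ⟨f0, hf0⟩ : ∃ f0, (k - j + 2).toNat = f0 + 1 := ⟨(k - j + 1).toNat, by omega⟩
  unfold GW
  rw [hf0]
  simp only [gW, if_neg (by omega : ¬ j > k)]
  have hbase : gW T f0 (j + 1) (k - 1) = gW T ((k - 1) - (j + 1) + 2).toNat (j + 1) (k - 1) := by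
    apply gW_fuel_congr <;> omega
  rw [hbase]
  apply PySem.List.foldl_congr_mem
  intro acc m hm
  rw [PySem.List.mem_pyRange_iff_of_pos (by norm_num)] at hm
  obtain ⟨h1, h2, -⟩ := hm
  have e1 : gW T f0 j m = gW T (m - j + 2).toNat j m := by apply gW_fuel_congr <;> omega
  have e2 : gW T f0 (m + 1) k = gW T (k - (m + 1) + 2).toNat (m + 1) k := by
    apply gW_fuel_congr <;> omega
  simp [e1, e2]

def GoodMemo (T : List Int) (memo : PySem.Dict (Int × Int) Int) : Prop :=
  ∀ p v, memo.get? p = some v → v = GW T p.1 p.2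

theorem wiredSolve_correct (T : List Int) :
    ∀ (fuel : Nat) (j k : Int) (memo : PySem.Dict (Int × Int) Int),
      (k - j + 2).toNat ≤ fuel → GoodMemo T memo →
      (wiredSolve T fuel j k memo).1 = GW T j k ∧ GoodMemo T (wiredSolve T fuel j k memo).2 := by
  intro fuel
  induction fuel with
  | zero =>
    intro j k memo hf hg
    exact ⟨(GW_of_gt T j k (by omega)).symm, hg⟩
  | succ f0 ih =>
    intro j k memo hf hg
    by_cases hjk : j > k
    · simp only [wiredSolve, if_pos hjk]
      exact ⟨(GW_of_gt T j k hjk).symm, hg⟩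
    · have hle : j ≤ k := by omega
      simp only [wiredSolve, if_neg hjk]
      cases hmem : memo.get? (j, k) with
      | some v =>
        exact ⟨hg (j, k) v hmem, hg⟩
      | none =>
        simp only
        obtain ⟨hr1, hr2⟩ := ih (j + 1) (k - 1) memo (by omega) hg
        -- the inner fold
        have aux : ∀ (l : List Int), (∀ m ∈ l, j + 1 ≤ m ∧ m < k - 1) →
            ∀ (mc : Int) (d : PySem.Dict (Int × Int) Int), GoodMemo T d →
            (l.foldl (fun st m =>
                let a := wiredSolve T f0 j m st.2
                let b := wiredSolve T f0 (m + 1) k a.2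
                let c := a.1 + b.1
                if c < st.1 then (c, b.2) else (st.1, b.2)) (mc, d)).1
              = l.foldl (fun mc m =>
                  let c := GW T j m + GW T (m + 1) k; if c < mc then c else mc) mc ∧
            GoodMemo T (l.foldl (fun st m =>
                let a := wiredSolve T f0 j m st.2
                let b := wiredSolve T f0 (m + 1) k a.2
                let c := a.1 + b.1
                if c < st.1 then (c, b.2) else (st.1, b.2)) (mc, d)).2 := by
          intro l
          induction l with
          | nil => intro _ mc d hd; exact ⟨rfl, hd⟩
          | cons m t iht =>
            intro hb mc d hd
            obtain ⟨hm1, hm2⟩ := hb m (List.mem_cons_self ..)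
            obtain ⟨ha1, ha2⟩ := ih j m d (by omega) hd
            obtain ⟨hb1, hb2⟩ := ih (m + 1) k (wiredSolve T f0 j m d).2 (by omega) ha2
            simp only [List.foldl_cons]
            have hstep : (let a := wiredSolve T f0 j m (mc, d).2
                let b := wiredSolve T f0 (m + 1) k a.2
                let c := a.1 + b.1
                if c < (mc, d).1 then (c, b.2) else ((mc, d).1, b.2))
              = ((if GW T j m + GW T (m + 1) k < mc then GW T j m + GW T (m + 1) k else mc),
                 (wiredSolve T f0 (m + 1) k (wiredSolve T f0 j m d).2).2) := by
              simp only [ha1, hb1]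
              by_cases hc : GW T j m + GW T (m + 1) k < mc <;> simp [hc]
            rw [hstep]
            exact iht (fun x hx => hb x (List.mem_cons_of_mem _ hx)) _ _ hb2
        obtain ⟨hs1, hs2⟩ := aux (PySem.List.pyRange (j + 1) (k - 1) 2)
          (by intro m hm
              rw [PySem.List.mem_pyRange_iff_of_pos (by norm_num)] at hm
              exact ⟨hm.1, hm.2.1⟩)
          (1 + |PySem.List.pyGetD T j 0 - PySem.List.pyGetD T k 0| + (wiredSolve T f0 (j + 1) (k - 1) memo).1)
          (wiredSolve T f0 (j + 1) (k - 1) memo).2 hr2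
        constructor
        · rw [GW_eq T j k hle, ← hr1]; exact hs1
        · intro p v hp
          rw [PySem.Dict.get?_insert] at hp
          split at hp
          · rename_i hpk
            subst hpk
            cases hp
            rw [GW_eq T j k hle, ← hr1]; exact hs1
          · exact hs2 p v hp

theorem wired_alt_eq (T : List Int) :
    wired_alt T = if (T.length : Int) = 0 ∨ (T.length : Int) % 2 = 1 then 0
                  else GW T 0 ((T.length : Int) - 1) := by
  unfold wired_alt
  simp only
  split
  · rfl
  · exact (wiredSolve_correct T (T.length + 1) 0 ((T.length : Int) - 1) PySem.Dict.empty
      (by omega)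
      (by intro p v h; rw [PySem.Dict.get?_empty] at h; cases h)).1
-- ===== A side =====
def dRead (dp : List (List Int)) (a b : Int) : Int :=
  PySem.List.pyGetD (PySem.List.pyGetD dp a []) b 0

def Shaped (n : Nat) (dp : List (List Int)) : Prop :=
  dp.length = n ∧ ∀ r ∈ dp, r.length = n

def Filled (T : List Int) (dp : List (List Int)) (I J : Int) : Prop :=
  ∀ a b : Int, 0 ≤ a → a < (T.length : Int) → 0 ≤ b → b < (T.length : Int) →
    dRead dp a b = if a ≤ b ∧ (b - a) % 2 = 1 ∧ (b - a + 1 < I ∨ (b - a + 1 = I ∧ a < J))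
                   then GW T a b else 0

def stepA (T : List Int) (i : Int) (dp : List (List Int)) (j : Int) : List (List Int) :=
  let k := j + i - 1
  let raw_sum := 1 + |PySem.List.pyGetD T j 0 - PySem.List.pyGetD T k 0|
      + PySem.List.pyGetD (PySem.List.pyGetD dp (j + 1) []) (k - 1) 0
  let min_cost := (PySem.List.pyRange (j + 1) (k - 1) 2).foldl (fun mc m =>
    let cd := PySem.List.pyGetD (PySem.List.pyGetD dp j []) m 0
            + PySem.List.pyGetD (PySem.List.pyGetD dp (m + 1) []) k 0
    if cd < mc then cd else mc) raw_sum
  PySem.List.pySetD dp j (PySem.List.pySetD (PySem.List.pyGetD dp j []) k min_cost)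

def dp0T (T : List Int) : List (List Int) :=
  (PySem.List.pyRange 0 (T.length : Int) 1).map (fun _ => List.replicate T.length (0 : Int))

theorem pyGetD_default_or_mem {α : Type} (xs : List α) (i : Int) (d : α) :
    PySem.List.pyGetD xs i d = d ∨ PySem.List.pyGetD xs i d ∈ xs := by
  cases h : PySem.List.pyGet? xs i with
  | none => left; simp [PySem.List.pyGetD, h]
  | some x =>
    right
    have := PySem.List.mem_of_pyGet?_eq_some xs h
    simpa [PySem.List.pyGetD, h] using this

theorem shaped_dp0 (T : List Int) : Shaped T.length (dp0T T) := by
  constructor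
  · simp [dp0T, PySem.List.length_pyRange_one]
  · intro r hr
    simp only [dp0T, List.mem_map] at hr
    obtain ⟨-, -, rfl⟩ := hr
    simp

theorem dRead_dp0 (T : List Int) (a b : Int) : dRead (dp0T T) a b = 0 := by
  have hz : ∀ x ∈ PySem.List.pyGetD (dp0T T) a [], x = (0 : Int) := by
    rcases pyGetD_default_or_mem (dp0T T) a ([] : List Int) with h | h
    · simp [h]
    · simp only [dp0T, List.mem_map] at h
      obtain ⟨w, hw, heq⟩ := h
      intro x hx
      rw [dp0T, ← heq] at hx
      exact List.eq_of_mem_replicate hx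
  unfold dRead
  rcases pyGetD_default_or_mem (PySem.List.pyGetD (dp0T T) a []) b (0 : Int) with h | h
  · exact h
  · exact hz _ h

theorem filled_dp0 (T : List Int) : Filled T (dp0T T) 2 0 := by
  intro a b _ _ _ _
  rw [dRead_dp0]
  split
  · rename_i hc
    omega
  · rfl

theorem row_length (n : Nat) (dp : List (List Int)) (hs : Shaped n dp)
    (j : Int) (hj0 : 0 ≤ j) (hjn : j < (n : Int)) :
    (PySem.List.pyGetD dp j []).length = n := by
  have hjl : j < (dp.length : Int) := by rw [hs.1]; exact_mod_cast hjn
  rw [PySem.List.pyGetD_eq_getElem dp [] hj0 hjl]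
  exact hs.2 _ (List.getElem_mem _)

theorem shaped_set (n : Nat) (dp : List (List Int)) (hs : Shaped n dp)
    (j k v : Int) (hj0 : 0 ≤ j) (hjn : j < (n : Int)) :
    Shaped n (PySem.List.pySetD dp j (PySem.List.pySetD (PySem.List.pyGetD dp j []) k v)) := by
  constructor
  · rw [PySem.List.length_pySetD]; exact hs.1
  · intro r hr
    rw [PySem.List.pySetD_of_nonneg _ _ hj0] at hr
    rcases List.mem_or_eq_of_mem_set hr with h | h
    · exact hs.2 r h
    · rw [h, PySem.List.length_pySetD]
      exact row_length n dp hs j hj0 hjn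

theorem dRead_set (n : Nat) (dp : List (List Int)) (hs : Shaped n dp)
    (j k v : Int) (hj0 : 0 ≤ j) (hjn : j < (n : Int)) (hk0 : 0 ≤ k) (hkn : k < (n : Int))
    (a b : Int) (ha0 : 0 ≤ a) (_han : a < (n : Int)) (hb0 : 0 ≤ b) (_hbn : b < (n : Int)) :
    dRead (PySem.List.pySetD dp j (PySem.List.pySetD (PySem.List.pyGetD dp j []) k v)) a b
      = if a = j ∧ b = k then v else dRead dp a b := by
  lift j to Nat using hj0 with jn
  lift k to Nat using hk0 with kn
  lift a to Nat using ha0 with an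
  lift b to Nat using hb0 with bn
  have hjl : jn < dp.length := by rw [hs.1]; exact_mod_cast hjn
  have hrl : kn < (PySem.List.pyGetD dp (jn : Int) []).length := by
    rw [row_length n dp hs (jn : Int) (by positivity) hjn]; exact_mod_cast hkn
  unfold dRead
  rw [PySem.List.pyGetD_pySetD_natCast dp jn an _ [] hjl]
  by_cases haj : an = jn
  · subst haj
    rw [if_pos rfl, PySem.List.pyGetD_pySetD_natCast _ kn bn v 0 hrl]
    by_cases hbk : bn = kn
    · subst hbk; simp
    · rw [if_neg hbk, if_neg (by intro h; exact hbk (by exact_mod_cast h.2))]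
  · rw [if_neg haj, if_neg (by intro h; exact haj (by exact_mod_cast h.1))]

theorem stepA_correct (T : List Int) (i j : Int) (dp : List (List Int))
    (hi2 : 2 ≤ i) (hie : i % 2 = 0) (hj0 : 0 ≤ j) (hjN : j ≤ (T.length : Int) - i)
    (hs : Shaped T.length dp) (hf : Filled T dp i j) :
    Shaped T.length (stepA T i dp j) ∧ Filled T (stepA T i dp j) i (j + 1) := by
  have hN : (2 : Int) ≤ (T.length : Int) := by omega
  have hmc : ((PySem.List.pyRange (j + 1) (j + i - 1 - 1) 2).foldl (fun mc m =>
      let cd := PySem.List.pyGetD (PySem.List.pyGetD dp j []) m 0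
              + PySem.List.pyGetD (PySem.List.pyGetD dp (m + 1) []) (j + i - 1) 0
      if cd < mc then cd else mc)
      (1 + |PySem.List.pyGetD T j 0 - PySem.List.pyGetD T (j + i - 1) 0|
        + PySem.List.pyGetD (PySem.List.pyGetD dp (j + 1) []) (j + i - 1 - 1) 0))
      = GW T j (j + i - 1) := by
    have hinit : PySem.List.pyGetD (PySem.List.pyGetD dp (j + 1) []) (j + i - 1 - 1) 0
        = GW T (j + 1) (j + i - 1 - 1) := by
      have h := hf (j + 1) (j + i - 1 - 1) (by omega) (by omega) (by omega) (by omega)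
      unfold dRead at h
      by_cases hi4 : i = 2
      · rw [h, if_neg (by omega), GW_of_gt T _ _ (by omega)]
      · rw [h, if_pos ⟨by omega, by omega, Or.inl (by omega)⟩]
    rw [GW_eq T j (j + i - 1) (by omega), ← hinit]
    apply PySem.List.foldl_congr_mem
    intro acc m hm
    rw [PySem.List.mem_pyRange_iff_of_pos (by norm_num)] at hm
    obtain ⟨hm1, hm2, hm3⟩ := hm
    have h1 := hf j m hj0 (by omega) (by omega) (by omega)
    unfold dRead at h1
    rw [if_pos ⟨by omega, by omega, Or.inl (by omega)⟩] at h1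
    have h2 := hf (m + 1) (j + i - 1) (by omega) (by omega) (by omega) (by omega)
    unfold dRead at h2
    rw [if_pos ⟨by omega, by omega, Or.inl (by omega)⟩] at h2
    simp only [h1, h2]
  constructor
  · unfold stepA
    simp only
    rw [hmc]
    exact shaped_set _ _ hs _ _ _ hj0 (by omega)
  · intro a b ha0 haN hb0 hbN
    unfold stepA
    simp only
    unfold dRead
    rw [hmc]
    have hset := dRead_set T.length dp hs j (j + i - 1) (GW T j (j + i - 1))
      hj0 (by omega) (by omega) (by omega) a b ha0 haN hb0 hbN
    unfold dRead at hset
    rw [hset]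
    by_cases hab : a = j ∧ b = j + i - 1
    · rw [if_pos hab, if_pos ⟨by omega, by omega, Or.inr ⟨by omega, by omega⟩⟩, hab.1, hab.2]
    · rw [if_neg hab]
      have h := hf a b ha0 haN hb0 hbN
      unfold dRead at h
      rw [h]
      by_cases hc : a ≤ b ∧ (b - a) % 2 = 1 ∧ (b - a + 1 < i ∨ (b - a + 1 = i ∧ a < j))
      · rw [if_pos hc, if_pos ⟨hc.1, hc.2.1, by omega⟩]
      · rw [if_neg hc, if_neg (by omega)]

theorem rowLoop_correct (T : List Int) (i : Int) (dp : List (List Int))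
    (hi2 : 2 ≤ i) (hie : i % 2 = 0) (hs : Shaped T.length dp) (hf : Filled T dp i 0) :
    ∀ t : Nat, (t : Int) ≤ (T.length : Int) - i + 1 →
      Shaped T.length ((PySem.List.pyRange 0 (t : Int) 1).foldl (stepA T i) dp) ∧
      Filled T ((PySem.List.pyRange 0 (t : Int) 1).foldl (stepA T i) dp) i (t : Int) := by
  intro t
  induction t with
  | zero =>
    intro _
    rw [PySem.List.pyRange_one_eq_nil (by norm_num)]
    exact ⟨hs, hf⟩
  | succ t ih =>
    intro ht
    have hc : ((t + 1 : Nat) : Int) = (t : Int) + 1 := by push_cast; ring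
    rw [hc, PySem.List.pyRange_one_succ_right (by positivity), List.foldl_append]
    obtain ⟨hs', hf'⟩ := ih (by omega)
    simp only [List.foldl_cons, List.foldl_nil]
    obtain ⟨hs'', hf''⟩ := stepA_correct T i (t : Int) _ hi2 hie (by positivity) (by omega) hs' hf'
    exact ⟨hs'', hf''⟩

theorem filled_shift (T : List Int) (dp : List (List Int)) (i : Int)
    (_hi2 : 2 ≤ i) (hie : i % 2 = 0)
    (hf : Filled T dp i ((T.length : Int) - i + 1)) : Filled T dp (i + 2) 0 := by
  intro a b ha0 haN hb0 hbN
  rw [hf a b ha0 haN hb0 hbN]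
  by_cases hc : a ≤ b ∧ (b - a) % 2 = 1 ∧
      (b - a + 1 < i ∨ (b - a + 1 = i ∧ a < (T.length : Int) - i + 1))
  · rw [if_pos hc, if_pos ⟨hc.1, hc.2.1, by omega⟩]
  · rw [if_neg hc, if_neg (by omega)]

theorem outer_correct (T : List Int) (_h1 : 1 ≤ (T.length : Int)) :
    ∀ t : Nat, (t : Int) ≤ (T.length : Int) / 2 →
      Shaped T.length ((List.range t).foldl (fun dp (s : Nat) =>
        (PySem.List.pyRange 0 ((T.length : Int) - (2 + 2 * (s : Int)) + 1) 1).foldl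
          (stepA T (2 + 2 * (s : Int))) dp) (dp0T T)) ∧
      Filled T ((List.range t).foldl (fun dp (s : Nat) =>
        (PySem.List.pyRange 0 ((T.length : Int) - (2 + 2 * (s : Int)) + 1) 1).foldl
          (stepA T (2 + 2 * (s : Int))) dp) (dp0T T)) (2 + 2 * (t : Int)) 0 := by
  intro t
  induction t with
  | zero =>
    intro _
    simp only [List.range_zero, List.foldl_nil, Nat.cast_zero, mul_zero, add_zero]
    exact ⟨shaped_dp0 T, filled_dp0 T⟩
  | succ t ih =>
    intro ht
    have htI : ((t + 1 : Nat) : Int) = (t : Int) + 1 := by push_cast; ring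
    rw [htI] at ht ⊢
    rw [List.range_succ, List.foldl_append]
    obtain ⟨hs', hf'⟩ := ih (by omega)
    simp only [List.foldl_cons, List.foldl_nil]
    set i : Int := 2 + 2 * (t : Int) with hi
    have hiN : i ≤ (T.length : Int) := by omega
    have hcnt : (((T.length : Int) - i + 1).toNat : Int) = (T.length : Int) - i + 1 := by omega
    obtain ⟨hs'', hf''⟩ := rowLoop_correct T i _ (by omega) (by omega) hs' hf'
      ((T.length : Int) - i + 1).toNat (by omega)
    rw [hcnt] at hs'' hf''
    refine ⟨hs'', ?_⟩
    have := filled_shift T _ i (by omega) (by omega) hf''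
    have he : 2 + 2 * ((t : Int) + 1) = i + 2 := by omega
    rw [he]
    exact this


theorem wired_def (T : List Int) :
    wired T = if (T.length : Int) = 0 then 0 else
      PySem.List.pyGetD (PySem.List.pyGetD
        ((PySem.List.pyRange 2 ((T.length : Int) + 1) 2).foldl (fun dp i =>
          (PySem.List.pyRange 0 ((T.length : Int) - i + 1) 1).foldl (stepA T i) dp) (dp0T T))
        0 []) ((T.length : Int) - 1) 0 := rfl


theorem wired_eq (T : List Int) :
    wired T = if (T.length : Int) = 0 then 0
              else if (T.length : Int) % 2 = 1 then 0 else GW T 0 ((T.length : Int) - 1) := by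
  rw [wired_def]
  by_cases h0 : (T.length : Int) = 0
  · rw [if_pos h0, if_pos h0]
  · rw [if_neg h0, if_neg h0]
    have h1 : 1 ≤ (T.length : Int) := by omega
    rw [PySem.List.pyRange_of_pos 2 ((T.length : Int) + 1) (by norm_num), List.foldl_map]
    by_cases hN1 : (T.length : Int) = 1
    · rw [if_neg (by omega)]
      rw [hN1]
      norm_num
      have hz := dRead_dp0 T 0 0
      unfold dRead at hz
      rw [hz]
    · have hN2 : 2 ≤ (T.length : Int) := by omega
      have hlt : (2 : Int) < (T.length : Int) + 1 := by omega
      rw [if_pos hlt]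
      have hcnt : (((T.length : Int) + 1 - 2 + 2 - 1) / 2) = (T.length : Int) / 2 := by omega
      rw [hcnt]
      obtain ⟨-, hf⟩ := outer_correct T h1 ((T.length : Int) / 2).toNat (by omega)
      have hread := hf 0 ((T.length : Int) - 1) (by omega) (by omega) (by omega) (by omega)
      unfold dRead at hread
      rw [hread]
      have hc : ((((T.length : Int)) / 2).toNat : Int) = (T.length : Int) / 2 := by omega
      rw [hc]
      by_cases hp : (T.length : Int) % 2 = 1
      · rw [if_pos hp, if_neg (by omega)]
      · rw [if_neg hp, if_pos ⟨by omega, by omega, Or.inl (by omega)⟩]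

-- ===== VERDICT (by name: the statement is the Claim_ definition above) =====
theorem wired_spec : Claim_equal_wired := by
  intro T _
  unfold Spec_wired
  rw [wired_eq, wired_alt_eq]
  by_cases h0 : (T.length : Int) = 0
  · simp [h0]
  · by_cases h1 : (T.length : Int) % 2 = 1
    · simp [h1]
    · simp [h1]
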